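-- pv_equiv track=rewrite | github.com/Brice580/encode-plcp | TestingUtils.py | construct_suffix_array_naive
-- ===== SOURCE A (Python) =====
-- import string
--
-- def construct_suffix_array_naive(string):
--
--     string += "$"
--     suffixes = []
--     for i in range(len(string)):
--         suffixes.append((string[i:], i))
--     suffix_array = []
--
--     for suffix in sorted(suffixes):
--         suffix_array.append(suffix[1])
--     return suffix_array
-- ===== SOURCE B (Python) =====
-- def construct_suffix_array_naive(string):
--     text = string + "$"
--     remaining = list(range(len(text)))
--     suffix_array = []
--     while remaining:
--         best = min(remaining, key=lambda i: text[i:])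
--         suffix_array.append(best)
--         remaining.remove(best)
--     return suffix_array
-- ===== Notes on version B (the rewrite author's own statement) =====
-- stated objective: alternative
-- what changed: B never materializes the list of suffix strings and never calls sort: it repeatedly selects the index of the smallest remaining suffix with min(remaining, key=...) and removes it (selection by minimum), instead of building all (suffix, index) pairs and sorting them.
import Mathlib
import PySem

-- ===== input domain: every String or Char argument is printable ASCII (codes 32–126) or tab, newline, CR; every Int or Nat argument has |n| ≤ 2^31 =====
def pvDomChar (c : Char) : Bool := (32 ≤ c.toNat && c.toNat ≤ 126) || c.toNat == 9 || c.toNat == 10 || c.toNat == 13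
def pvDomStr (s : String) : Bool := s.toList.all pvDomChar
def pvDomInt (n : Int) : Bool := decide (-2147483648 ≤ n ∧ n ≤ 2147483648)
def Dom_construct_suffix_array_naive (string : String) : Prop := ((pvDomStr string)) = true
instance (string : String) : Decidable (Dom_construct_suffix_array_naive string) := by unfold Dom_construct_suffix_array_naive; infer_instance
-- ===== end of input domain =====

-- B replaces build-all-suffixes-and-sort by repeated selection of the minimal remaining suffix (alternative decomposition, no speed claim).

-- ===== PORT A =====
-- string += "$"; suffixes = [(string[i:], i) for i in range(len(string))] (as a loop); then sorted (tuple lex) and collect indices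
def construct_suffix_array_naive (string : String) : List Int :=
  let s : List Char := string.toList ++ ['$']
  let suffixes : List (List Char × Int) :=
    (PySem.List.pyRange 0 (s.length : Int) 1).foldl
      (fun acc i => acc ++ [(PySem.List.slice s (some i) none, i)]) []
  (PySem.List.sorted2 suffixes (fun p => p.1) (fun p => p.2)).foldl
    (fun acc p => acc ++ [p.2]) []

-- ===== PORT B =====
-- while remaining: best = min(remaining, key=lambda i: text[i:]); append; remaining.remove(best)
-- (remaining.remove(best) is List.erase; best is always a member, so Python never raises here)
def pvSelectLoop (text : List Char) (remaining : List Int) (acc : List Int) : List Int :=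
  match hm : PySem.List.min? remaining (fun i => PySem.List.slice text (some i) none) with
  | none => acc
  | some m => pvSelectLoop text (remaining.erase m) (acc ++ [m])
termination_by remaining.length
decreasing_by
  have hmem := PySem.List.min?_mem hm
  have := List.length_erase_of_mem hmem
  have : 0 < remaining.length := List.length_pos_of_mem hmem
  omega

def construct_suffix_array_naive_alt (string : String) : List Int :=
  let text : List Char := string.toList ++ ['$']
  pvSelectLoop text (PySem.List.pyRange 0 (text.length : Int) 1) []

-- ===== PRECONDITION & SPEC =====
def Spec_construct_suffix_array_naive (string : String) (out : List Int) : Prop := out = construct_suffix_array_naive_alt string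
instance (string : String) (out : List Int) : Decidable (Spec_construct_suffix_array_naive string out) := by unfold Spec_construct_suffix_array_naive; infer_instance

-- ===== CLAIM (what is proved, stated in full; the proofs are below) =====
def Claim_equal_construct_suffix_array_naive : Prop := ∀ (string : String), Dom_construct_suffix_array_naive string → Spec_construct_suffix_array_naive string (construct_suffix_array_naive string)

-- ===== LEMMAS AND PROOFS =====

-- Python's tuple comparison used by sorted(suffixes), on (suffix, index) pairs
def pvBefore (a b : List Char × Int) : Bool :=
  decide (a.1 < b.1) || (!decide (b.1 < a.1) && decide (a.2 < b.2))

-- the two DecidableLT instances on List Char in scope are equal (Decidable is a subsingleton)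
theorem pvInstEq : (fun (a b : List Char) => a.decidableLT b) =
    ((inferInstance : LinearOrder (List Char)).toDecidableLT) := by
  funext a b; exact Subsingleton.elim _ _

theorem pvBefore_iff (a b : List Char × Int) :
    pvBefore a b = true ↔ a.1 < b.1 ∨ (a.1 = b.1 ∧ a.2 < b.2) := by
  simp only [pvBefore, Bool.or_eq_true, Bool.and_eq_true, Bool.not_eq_true',
    decide_eq_true_eq, decide_eq_false_iff_not, not_lt]
  constructor
  · rintro (h | ⟨hle, h2⟩)
    · exact Or.inl h
    · rcases lt_or_eq_of_le hle with h | h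
      · exact Or.inl h
      · exact Or.inr ⟨h, h2⟩
  · rintro (h | ⟨h1, h2⟩)
    · exact Or.inl h
    · exact Or.inr ⟨le_of_eq h1, h2⟩

theorem pvBefore_trans {a b c : List Char × Int}
    (h1 : pvBefore a b = true) (h2 : pvBefore b c = true) : pvBefore a c = true := by
  rw [pvBefore_iff] at *
  rcases h1 with h1 | ⟨h1a, h1b⟩ <;> rcases h2 with h2 | ⟨h2a, h2b⟩
  · exact Or.inl (h1.trans h2)
  · exact Or.inl (h2a ▸ h1)
  · exact Or.inl (h1a ▸ h2)
  · exact Or.inr ⟨h1a.trans h2a, h1b.trans h2b⟩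

theorem pvBefore_asym {a b : List Char × Int}
    (h : pvBefore a b = true) : pvBefore b a = false := by
  by_contra hc
  have hba : pvBefore b a = true := by
    cases hh : pvBefore b a with
    | true => rfl
    | false => exact absurd hh hc
  rw [pvBefore_iff] at h hba
  rcases h with h | ⟨h1, h2⟩ <;> rcases hba with g | ⟨g1, g2⟩
  · exact absurd (h.trans g) (lt_irrefl _)
  · exact absurd h (g1 ▸ lt_irrefl _)
  · exact absurd g (h1 ▸ lt_irrefl _)
  · exact absurd (h2.trans g2) (lt_irrefl _)

theorem pvBefore_antisymm {a b : List Char × Int}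
    (hab : pvBefore a b = false) (hba : pvBefore b a = false) : a = b := by
  have h1 : a.1 = b.1 := by
    rcases lt_trichotomy a.1 b.1 with h | h | h
    · exact absurd ((pvBefore_iff a b).mpr (Or.inl h)) (by simp [hab])
    · exact h
    · exact absurd ((pvBefore_iff b a).mpr (Or.inl h)) (by simp [hba])
  have h2 : a.2 = b.2 := by
    rcases lt_trichotomy a.2 b.2 with h | h | h
    · exact absurd ((pvBefore_iff a b).mpr (Or.inr ⟨h1, h⟩)) (by simp [hab])
    · exact h
    · exact absurd ((pvBefore_iff b a).mpr (Or.inr ⟨h1.symm, h⟩)) (by simp [hba])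
  exact Prod.ext h1 h2

theorem insertBy_pairwise (x : List Char × Int) (l : List (List Char × Int))
    (hl : l.Pairwise (fun a b => pvBefore b a = false)) :
    (PySem.List.insertBy pvBefore x l).Pairwise (fun a b => pvBefore b a = false) := by
  induction l with
  | nil => simp [PySem.List.insertBy]
  | cons y ys ih =>
    rcases hl with _ | ⟨hy, hys⟩
    simp only [PySem.List.insertBy]
    split
    · rename_i hxy
      refine List.Pairwise.cons ?_ (List.Pairwise.cons hy hys)
      intro z hz
      rcases List.mem_cons.mp hz with rfl | hz
      · exact pvBefore_asym hxy
      · by_contra hc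
        have hzx : pvBefore z x = true := by
          cases h : pvBefore z x with
          | true => rfl
          | false => exact absurd h hc
        have := pvBefore_trans hzx hxy
        have := hy z hz
        simp_all
    · rename_i hxy
      refine List.Pairwise.cons ?_ (ih hys)
      intro z hz
      rcases (PySem.List.mem_insertBy _ _ _ _).mp hz with rfl | hz
      · simpa using hxy
      · exact hy z hz

theorem foldl_insertBy_pairwise (xs acc : List (List Char × Int))
    (hacc : acc.Pairwise (fun a b => pvBefore b a = false)) :
    (xs.foldl (fun acc x => PySem.List.insertBy pvBefore x acc) acc).Pairwise
      (fun a b => pvBefore b a = false) := by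
  induction xs generalizing acc with
  | nil => simpa
  | cons x xs ih => exact ih _ (insertBy_pairwise x acc hacc)

-- uniqueness: any fst-strictly-increasing rearrangement of xs IS sorted(xs) (tuple comparison)
theorem sorted2_eq_of_perm (xs ys : List (List Char × Int)) (hperm : ys.Perm xs)
    (hpw : ys.Pairwise (fun a b => a.1 < b.1)) :
    PySem.List.sorted2 xs (fun p => p.1) (fun p => p.2) = ys := by
  have hS : PySem.List.sorted2 xs (fun p => p.1) (fun p => p.2) =
      xs.foldl (fun acc x => PySem.List.insertBy pvBefore x acc) [] := rfl
  have hSpw : (PySem.List.sorted2 xs (fun p => p.1) (fun p => p.2)).Pairwise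
      (fun a b => pvBefore b a = false) := by
    rw [hS]; exact foldl_insertBy_pairwise xs [] (by simp)
  have hypw : ys.Pairwise (fun a b => pvBefore b a = false) := by
    refine hpw.imp ?_
    intro a b h
    exact pvBefore_asym (by simp [pvBefore, h])
  refine List.eq_of_perm_of_sorted ?_ hSpw hypw
    ((PySem.List.sorted2_perm xs _ _ _).trans hperm.symm)
  intro a b _ _ hab hba
  exact pvBefore_antisymm hba hab

-- accumulator comes straight out of the selection loop
theorem pvSelectLoop_acc (text : List Char) :
    ∀ (k : Nat) (rem acc : List Int), rem.length = k →
      pvSelectLoop text rem acc = acc ++ pvSelectLoop text rem [] := by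
  intro k
  induction k using Nat.strong_induction_on with
  | _ k ih =>
    intro rem acc hlen
    rw [pvSelectLoop.eq_def, pvSelectLoop.eq_def]
    cases hmn : PySem.List.min? rem (fun i => PySem.List.slice text (some i) none) with
    | none => simp
    | some m =>
      simp only
      have hmem := PySem.List.min?_mem hmn
      have h1 := List.length_erase_of_mem hmem
      have h2 := List.length_pos_of_mem hmem
      have hlt : (rem.erase m).length < k := by omega
      rw [ih _ hlt _ (acc ++ [m]) rfl, ih _ hlt _ ([] ++ [m]) rfl]
      simp

-- the selection loop returns a strictly key-increasing permutation of `rem`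
theorem pvSelectLoop_main (text : List Char) :
    ∀ (k : Nat) (rem : List Int), rem.length = k → rem.Nodup →
      (∀ a ∈ rem, ∀ b ∈ rem, a ≠ b →
        PySem.List.slice text (some a) none ≠ PySem.List.slice text (some b) none) →
      (pvSelectLoop text rem []).Perm rem ∧
      (pvSelectLoop text rem []).Pairwise
        (fun a b => PySem.List.slice text (some a) none < PySem.List.slice text (some b) none) := by
  intro k
  induction k using Nat.strong_induction_on with
  | _ k ih =>
    intro rem hlen hnd hinj
    rw [pvSelectLoop.eq_def]
    cases hmn : PySem.List.min? rem (fun i => PySem.List.slice text (some i) none) with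
    | none =>
      have : rem = [] := (PySem.List.min?_eq_none_iff _ _).mp hmn
      subst this
      simp
    | some m =>
      simp only
      have hmem := PySem.List.min?_mem hmn
      have hmin : ∀ y ∈ rem,
          PySem.List.slice text (some m) none ≤ PySem.List.slice text (some y) none := by
        rw [pvInstEq] at hmn
        exact PySem.List.min?_isMin hmn
      have h1 := List.length_erase_of_mem hmem
      have h2 := List.length_pos_of_mem hmem
      have hlt : (rem.erase m).length < k := by omega
      have hsub : ∀ x ∈ rem.erase m, x ∈ rem := fun x hx => List.mem_of_mem_erase hx
      obtain ⟨ihp, ihpw⟩ := ih _ hlt (rem.erase m) rfl (hnd.erase m)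
        (fun a ha b hb => hinj a (hsub a ha) b (hsub b hb))
      rw [pvSelectLoop_acc text _ _ _ rfl]
      simp only [List.nil_append]
      constructor
      · have hp1 : ([m] ++ pvSelectLoop text (rem.erase m) []).Perm (m :: rem.erase m) := by
          simpa using ihp
        exact hp1.trans (List.perm_cons_erase hmem).symm
      · rw [List.pairwise_append]
        refine ⟨by simp, ihpw, ?_⟩
        intro a ha b hb
        simp only [List.mem_singleton] at ha
        subst ha
        have hbrem : b ∈ rem := hsub b (ihp.mem_iff.mp hb)
        have hbne : b ≠ a := by
          intro h; subst h
          exact (hnd.not_mem_erase (ihp.mem_iff.mp hb)).elim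
        exact lt_of_le_of_ne (hmin b hbrem)
          (fun he => hinj a hmem b hbrem (fun h => hbne h.symm) he)

-- ===== VERDICT (by name: the statement is the Claim_ definition above) =====
theorem construct_suffix_array_naive_spec : Claim_equal_construct_suffix_array_naive := by
  intro string _
  unfold Spec_construct_suffix_array_naive construct_suffix_array_naive construct_suffix_array_naive_alt
  simp only [PySem.List.foldl_append_singleton_eq_map, List.nil_append]
  set s : List Char := string.toList ++ ['$'] with hs
  set B : List Int := pvSelectLoop s (PySem.List.pyRange 0 (s.length : Int) 1) [] with hB
  have hinj : ∀ a ∈ PySem.List.pyRange 0 (s.length : Int) 1,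
      ∀ b ∈ PySem.List.pyRange 0 (s.length : Int) 1, a ≠ b →
      PySem.List.slice s (some a) none ≠ PySem.List.slice s (some b) none := by
    intro a ha b hb hne he
    rw [PySem.List.mem_pyRange_one] at ha hb
    rw [PySem.List.slice_from s ha.1, PySem.List.slice_from s hb.1] at he
    have := congrArg List.length he
    simp only [List.length_drop] at this
    omega
  obtain ⟨hperm, hpw⟩ := pvSelectLoop_main s _ _ rfl
    (PySem.List.nodup_pyRange_one 0 _) hinj
  have hys : PySem.List.sorted2
      ((PySem.List.pyRange 0 (s.length : Int) 1).map
        (fun i => (PySem.List.slice s (some i) none, i)))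
      (fun p => p.1) (fun p => p.2) =
      B.map (fun i => (PySem.List.slice s (some i) none, i)) := by
    refine sorted2_eq_of_perm _ _ (hperm.map _) ?_
    rw [List.pairwise_map]
    exact hpw
  rw [hys, List.map_map]
  have hcomp : ((fun (p : List Char × Int) => p.2) ∘ fun i => (PySem.List.slice s (some i) none, i)) =
      id := rfl
  rw [hcomp, List.map_id]
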